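-- pv_equiv track=rewrite | github.com/ogunsolahabib/ex_py | pig_latin.py | is_all_cons
-- ===== SOURCE A (Python) =====
-- VOWELS= ["a", "e", "i", "o", "u"]
--
-- def is_all_cons(text):
--     count=0
--     for x in text:
--         if x in VOWELS:
--             return False
--         else:
--             count+=1
--     return len(text) == count
-- ===== SOURCE B (Python) =====
-- VOWELS = ["a", "e", "i", "o", "u"]
--
-- def is_all_cons(text):
--     # vowel-major: for each of the five vowels, one substring test over text
--     return all(v not in text for v in VOWELS)
-- ===== Notes on version B (the rewrite author's own statement) =====
-- stated objective: alternative
-- what changed: Inverts the traversal: instead of one character-by-character pass with an early return and a running count, B iterates over the five vowels and does one substring membership test of the whole text per vowel, so no per-character loop or counter exists.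
import Mathlib
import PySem

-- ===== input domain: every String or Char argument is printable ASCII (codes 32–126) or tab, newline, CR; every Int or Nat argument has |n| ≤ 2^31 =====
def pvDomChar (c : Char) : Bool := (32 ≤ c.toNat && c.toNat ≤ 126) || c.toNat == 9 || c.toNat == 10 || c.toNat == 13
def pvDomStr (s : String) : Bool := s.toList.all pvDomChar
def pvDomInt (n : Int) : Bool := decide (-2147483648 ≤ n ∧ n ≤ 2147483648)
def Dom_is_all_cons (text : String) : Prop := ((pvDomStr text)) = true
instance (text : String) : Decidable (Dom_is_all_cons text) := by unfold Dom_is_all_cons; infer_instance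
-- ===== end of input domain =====

-- B inverts the traversal: one substring test per vowel instead of A's per-character loop with a counter.

-- ===== PORT A =====
def pvVOWELS : List String := ["a", "e", "i", "o", "u"]

-- the for-loop of A: early `return False` on a vowel, else count += 1; at the end len(text) == count
def pvLoopA : List Char → Int → Int → Bool
  | [], count, len => decide (len = count)
  | x :: rest, count, len =>
      if pvVOWELS.contains (String.ofList [x]) then false
      else pvLoopA rest (count + 1) len

def is_all_cons (text : String) : Bool :=
  pvLoopA text.toList 0 (text.toList.length : Int)

-- ===== PORT B =====
-- all(v not in text for v in VOWELS): a substring membership test per vowel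
def is_all_cons_alt (text : String) : Bool :=
  pvVOWELS.all (fun v => ! PySem.Str.isIn v text)

-- ===== PRECONDITION & SPEC =====
def Spec_is_all_cons (text : String) (out : Bool) : Prop := out = is_all_cons_alt text
instance (text : String) (out : Bool) : Decidable (Spec_is_all_cons text out) := by unfold Spec_is_all_cons; infer_instance

-- ===== CLAIM (what is proved, stated in full; the proofs are below) =====
def Claim_equal_is_all_cons : Prop := ∀ (text : String), Dom_is_all_cons text → Spec_is_all_cons text (is_all_cons text)

-- ===== LEMMAS AND PROOFS =====

lemma pvSingleton_eq (c d : Char) : (String.ofList [c] = String.ofList [d]) ↔ c = d := by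
  constructor
  · intro h
    have := congrArg String.toList h
    simpa using this
  · rintro rfl; rfl

lemma pvSingleton_infix {c : Char} {l : List Char} : [c] <:+: l ↔ c ∈ l := by
  constructor
  · intro h
    have := h.sublist
    simpa using this
  · intro h
    obtain ⟨s, t, rfl⟩ := List.append_of_mem h
    exact ⟨s, t, by simp⟩

lemma pvMemVow (c : Char) :
    (pvVOWELS.contains (String.ofList [c]) = true) ↔ c ∈ (['a','e','i','o','u'] : List Char) := by
  constructor
  · intro h
    simp only [pvVOWELS, List.contains_eq_mem, decide_eq_true_eq,
      List.mem_cons, List.not_mem_nil, or_false] at h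
    rcases h with h | h | h | h | h <;>
      simp [(pvSingleton_eq c _).mp h]
  · intro h
    simp only [List.mem_cons, List.not_mem_nil, or_false] at h
    rcases h with rfl | rfl | rfl | rfl | rfl <;> decide

-- A's loop returns true iff no character of the remaining list is a vowel
lemma pvLoopA_eq (l : List Char) (count len : Int) (h : len = count + l.length) :
    pvLoopA l count len = !l.any (fun c => decide (c ∈ (['a','e','i','o','u'] : List Char))) := by
  induction l generalizing count with
  | nil => simp [pvLoopA, h]
  | cons x rest ih =>
      rw [pvLoopA]
      by_cases hx : x ∈ (['a','e','i','o','u'] : List Char)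
      · rw [if_pos ((pvMemVow x).mpr hx)]
        simp only [List.any_cons, hx, decide_true, Bool.true_or, Bool.not_true]
      · rw [if_neg (fun hc => hx ((pvMemVow x).mp hc)),
          ih (count + 1) (by rw [List.length_cons] at h; push_cast at h ⊢; omega)]
        simp only [List.any_cons, hx, decide_false, Bool.false_or]

-- B returns true iff no vowel occurs in text
lemma pvAlt_iff (text : String) :
    is_all_cons_alt text = true ↔
      ∀ c ∈ (['a','e','i','o','u'] : List Char), c ∉ text.toList := by
  unfold is_all_cons_alt
  rw [List.all_eq_true]
  constructor
  · intro h c hc hmem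
    have hv : String.ofList [c] ∈ pvVOWELS := by
      simp only [List.mem_cons, List.not_mem_nil, or_false] at hc
      rcases hc with rfl | rfl | rfl | rfl | rfl <;> decide
    have := h _ hv
    rw [Bool.not_eq_true', PySem.Str.isIn_eq] at this
    rw [PySem.Chars.isIn_eq_false_iff] at this
    exact this (by simpa using pvSingleton_infix.mpr hmem)
  · intro h v hv
    rw [Bool.not_eq_true', PySem.Str.isIn_eq, PySem.Chars.isIn_eq_false_iff]
    intro hinf
    simp only [pvVOWELS, List.mem_cons, List.not_mem_nil, or_false] at hv
    rcases hv with rfl | rfl | rfl | rfl | rfl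
    · exact h 'a' (by decide) (pvSingleton_infix.mp (by simpa using hinf))
    · exact h 'e' (by decide) (pvSingleton_infix.mp (by simpa using hinf))
    · exact h 'i' (by decide) (pvSingleton_infix.mp (by simpa using hinf))
    · exact h 'o' (by decide) (pvSingleton_infix.mp (by simpa using hinf))
    · exact h 'u' (by decide) (pvSingleton_infix.mp (by simpa using hinf))

-- ===== VERDICT (by name: the statement is the Claim_ definition above) =====
theorem is_all_cons_spec : Claim_equal_is_all_cons := by
  intro text _
  unfold Spec_is_all_cons is_all_cons
  rw [pvLoopA_eq _ 0 _ (by simp)]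
  rw [Bool.eq_iff_iff, Bool.not_eq_eq_eq_not, Bool.not_true, List.any_eq_false, pvAlt_iff]
  constructor
  · intro h c hc hm
    exact absurd (by simpa using hc) (by simpa using h c hm)
  · intro h c hc
    simp only [decide_eq_true_eq]
    intro hm
    exact h c hm hc
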